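-- pv_equiv track=rewrite | github.com/yoo-chris/Python-programmers | Lv0/숫자찾기.py | solution
-- ===== SOURCE A (Python) =====
-- def solution(num, k):
--     answer = 0
--     count = 0
--     t = 0
--     flag = 10   #왜 10인지 생각해보기
--     while num > 0:
--         t = num % 10
--         if t == k:
--             flag = count
--         num = num // 10
--         count += 1
--     if flag == 10:
--         answer = -1
--     else:
--         answer = count - flag
--     return answer
-- ===== SOURCE B (Python) =====
-- def solution(num, k):
--     if num <= 0:
--         return -1
--     t = str(k)
--     for i, ch in enumerate(str(num)):
--         if ch == t:
--             return i + 1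
--     return -1
-- ===== Notes on version B (the rewrite author's own statement) =====
-- stated objective: idiomatic
-- what changed: A peels digits numerically with %10 and //10, keeping count/flag bookkeeping for the last LSB match; B converts num to its decimal string and returns at the first character equal to str(k) via enumerate (same per-character comparison keeps multi-digit/negative k unmatched).
import Mathlib
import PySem

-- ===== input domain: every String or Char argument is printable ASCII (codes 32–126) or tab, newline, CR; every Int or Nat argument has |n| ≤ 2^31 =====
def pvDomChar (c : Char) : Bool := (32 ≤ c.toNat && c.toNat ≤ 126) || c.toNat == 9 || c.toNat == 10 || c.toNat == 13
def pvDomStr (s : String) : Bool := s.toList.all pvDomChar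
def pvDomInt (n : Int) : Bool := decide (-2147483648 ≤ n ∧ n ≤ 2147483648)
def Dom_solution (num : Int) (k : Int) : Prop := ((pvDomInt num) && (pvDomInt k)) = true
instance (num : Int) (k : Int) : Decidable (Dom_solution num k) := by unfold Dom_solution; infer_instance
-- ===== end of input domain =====

-- B replaces A's digit-peeling while-loop (count/flag bookkeeping) by an enumerate scan
-- over str(num) returning at the first character equal to str(k); same results, idiomatic.

-- ===== PORT A =====
-- A's while loop: state (num, count, flag); returns (count, flag) at exit.
def solutionLoop (k : Int) (num : Int) (count : Int) (flag : Int) : Int × Int :=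
  if h : num > 0 then
    let t := PySem.Int.mod num 10
    solutionLoop k (PySem.Int.floordiv num 10) (count + 1) (if t = k then count else flag)
  else (count, flag)
termination_by num.toNat
decreasing_by
  rw [PySem.Int.floordiv_eq_ediv_of_pos (by omega)]
  omega

def solution (num : Int) (k : Int) : Int :=
  let (count, flag) := solutionLoop k num 0 10
  if flag = 10 then -1 else count - flag

-- ===== PORT B =====
-- Source B: guard num <= 0; t = str(k); first i with str(num)[i] == t gives i+1, else -1.
def solution_alt (num : Int) (k : Int) : Int :=
  if num ≤ 0 then -1
  else
    match (PySem.List.enumerate (PySem.Int.toChars num) 0).find? (fun p => [p.2] == PySem.Int.toChars k) with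
    | some p => p.1 + 1
    | none => -1

-- ===== PRECONDITION & SPEC =====
def Spec_solution (num : Int) (k : Int) (out : Int) : Prop := out = solution_alt num k
instance (num : Int) (k : Int) (out : Int) : Decidable (Spec_solution num k out) := by unfold Spec_solution; infer_instance

-- ===== CLAIM (what is proved, stated in full; the proofs are below) =====
def Claim_equal_solution : Prop := ∀ (num : Int) (k : Int), Dom_solution num k → Spec_solution num k (solution num k)

-- ===== LEMMAS AND PROOFS =====

-- A's loop over the LSB-first digit list (proof-side mirror of solutionLoop).
def scanDigits (k : Int) : List Nat → Int → Int → Int × Int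
  | [], count, flag => (count, flag)
  | d :: ds, count, flag => scanDigits k ds (count + 1) (if (d : Int) = k then count else flag)

theorem solutionLoop_eq_scanDigits (k : Int) : ∀ (n : Nat) (count flag : Int),
    solutionLoop k (n : Int) count flag = scanDigits k (Nat.digits 10 n) count flag := by
  intro n
  induction n using Nat.strong_induction_on with
  | _ n ih =>
    intro count flag
    rcases Nat.eq_zero_or_pos n with h0 | hpos
    · subst h0; rw [solutionLoop]; simp [scanDigits]
    · rw [solutionLoop]
      have hgt : (n : Int) > 0 := by exact_mod_cast hpos
      rw [dif_pos hgt]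
      have hmod : PySem.Int.mod (n : Int) 10 = ((n % 10 : Nat) : Int) :=
        PySem.Int.mod_natCast n 10
      have hdiv : PySem.Int.floordiv (n : Int) 10 = ((n / 10 : Nat) : Int) :=
        PySem.Int.floordiv_natCast n 10
      rw [Nat.digits_def' (by norm_num : 1 < 10) hpos]
      simp only [hmod, hdiv, scanDigits]
      exact ih (n / 10) (Nat.div_lt_self hpos (by norm_num)) _ _

theorem pv_arith_ne10 (len j : Nat) (hj : j < len) (hlen : len ≤ 10) :
    ¬((0 : Int) + ((len - 1 - j : Nat) : Int) = 10) := by omega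

theorem pv_arith_final (len j : Nat) (hj : j < len) (_hlen : len ≤ 10) :
    (0 : Int) + (len : Int) - (0 + ((len - 1 - j : Nat) : Int)) = 0 + (j : Int) + 1 := by omega

theorem pv_arith_flag (count : Int) (len j : Nat) (_hj : j < len) :
    count + 1 + ((len - 1 - j : Nat) : Int) = count + ((len + 1 - 1 - j : Nat) : Int) := by omega

-- closed form of scanDigits: count advances by the length; flag records the last match.
theorem scanDigits_spec (k : Int) : ∀ (ds : List Nat) (count flag : Int),
    scanDigits k ds count flag =
      (count + ds.length,
        match ds.reverse.findIdx? (fun d : Nat => decide ((d : Int) = k)) with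
        | some j => count + ((ds.length - 1 - j : Nat) : Int)
        | none => flag) := by
  intro ds
  induction ds with
  | nil => intro count flag; simp [scanDigits]
  | cons d ds ih =>
    intro count flag
    simp only [scanDigits, ih, List.reverse_cons, List.findIdx?_append, List.length_cons]
    rcases hfi : ds.reverse.findIdx? (fun d : Nat => decide ((d : Int) = k)) with _ | j
    · simp only [Option.none_or]
      by_cases hd : (d : Int) = k
      · simp only [List.findIdx?_cons, hd, List.findIdx?_nil, Prod.mk.injEq]
        refine ⟨by push_cast; ring, ?_⟩
        simp
      · simp only [List.findIdx?_cons, hd, List.findIdx?_nil, Prod.mk.injEq]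
        refine ⟨by push_cast; ring, by simp⟩
    · have hj : j < ds.length := by
        have := List.findIdx?_eq_some_iff_findIdx_eq.mp hfi
        simpa using this.1
      simp only [Option.some_or, Prod.mk.injEq]
      refine ⟨by push_cast; ring, ?_⟩
      exact pv_arith_flag count ds.length j hj

-- Nat.toDigitsCore: the accumulator is appended on the right.
theorem toDigitsCore_acc (b : Nat) : ∀ (f n : Nat) (acc : List Char),
    Nat.toDigitsCore b f n acc = Nat.toDigitsCore b f n [] ++ acc := by
  intro f
  induction f with
  | zero => intro n acc; simp [Nat.toDigitsCore]
  | succ f ih =>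
    intro n acc
    simp only [Nat.toDigitsCore]
    by_cases h : n / b = 0
    · simp [h]
    · rw [if_neg h, if_neg h, ih (n / b) (Nat.digitChar (n % b) :: acc),
        ih (n / b) [Nat.digitChar (n % b)]]
      simp

-- Nat.toDigitsCore is fuel-irrelevant once the fuel exceeds n (b ≥ 2).
theorem toDigitsCore_fuel (b : Nat) (hb : 2 ≤ b) : ∀ (n f f' : Nat), n < f → n < f' →
    Nat.toDigitsCore b f n [] = Nat.toDigitsCore b f' n [] := by
  intro n
  induction n using Nat.strong_induction_on with
  | _ n ih =>
    intro f f' hf hf'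
    obtain ⟨f, rfl⟩ : ∃ g, f = g + 1 := ⟨f - 1, by omega⟩
    obtain ⟨f', rfl⟩ : ∃ g, f' = g + 1 := ⟨f' - 1, by omega⟩
    simp only [Nat.toDigitsCore]
    by_cases h : n / b = 0
    · simp [h]
    · rw [if_neg h, if_neg h, toDigitsCore_acc, toDigitsCore_acc b f' (n / b)]
      have hn0 : 0 < n := by
        rcases Nat.eq_zero_or_pos n with h0 | h0
        · subst h0; simp at h
        · exact h0
      have hlt : n / b < n := Nat.div_lt_self hn0 (by omega)
      rw [ih (n / b) hlt f f' (Nat.lt_of_lt_of_le hlt (Nat.lt_succ_iff.mp hf))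
        (Nat.lt_of_lt_of_le hlt (Nat.lt_succ_iff.mp hf'))]

theorem toDigits_small {n : Nat} (h : n < 10) : Nat.toDigits 10 n = [Nat.digitChar n] := by
  simp [Nat.toDigits, Nat.toDigitsCore, Nat.div_eq_of_lt h, Nat.mod_eq_of_lt h]

theorem toDigits_step {n : Nat} (h : 10 ≤ n) :
    Nat.toDigits 10 n = Nat.toDigits 10 (n / 10) ++ [Nat.digitChar (n % 10)] := by
  have hne : n / 10 ≠ 0 := by omega
  have h1 : Nat.toDigits 10 n = Nat.toDigitsCore 10 n (n / 10) [Nat.digitChar (n % 10)] := by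
    simp only [Nat.toDigits, Nat.toDigitsCore]
    rw [if_neg hne]
  rw [h1, toDigitsCore_acc,
    toDigitsCore_fuel 10 (by norm_num) (n / 10) n (n / 10 + 1)
      (by omega) (by omega)]
  rfl

-- str(n) for n > 0 is the reversed digit list rendered with digitChar.
theorem toDigits_eq_digits : ∀ (n : Nat), 0 < n →
    Nat.toDigits 10 n = ((Nat.digits 10 n).reverse).map Nat.digitChar := by
  intro n
  induction n using Nat.strong_induction_on with
  | _ n ih =>
    intro hpos
    rw [Nat.digits_def' (by norm_num : 1 < 10) hpos]
    by_cases h : n < 10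
    · have h0 : n / 10 = 0 := by omega
      rw [toDigits_small h, h0]
      simp [Nat.mod_eq_of_lt h]
    · rw [toDigits_step (by omega)]
      have hlt : n / 10 < n := Nat.div_lt_self hpos (by norm_num)
      rw [ih (n / 10) hlt (by omega)]
      simp

theorem toDigits_ne_nil (n : Nat) : Nat.toDigits 10 n ≠ [] := by
  by_cases h : n < 10
  · rw [toDigits_small h]; simp
  · rw [toDigits_step (by omega)]; simp

theorem digitChar_inj : ∀ d < 10, ∀ e < 10, (Nat.digitChar d = Nat.digitChar e ↔ d = e) := by
  decide

-- the per-character test [digitChar d] == str(k) means exactly "this digit is k".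
theorem singleton_eq_toChars_iff (d : Nat) (hd : d < 10) (k : Int) :
    ([Nat.digitChar d] = PySem.Int.toChars k ↔ (d : Int) = k) := by
  unfold PySem.Int.toChars
  by_cases hneg : k < 0
  · rw [if_pos hneg]
    constructor
    · intro h
      rcases hne : Nat.toDigits 10 k.natAbs with _ | ⟨c, cs⟩
      · exact absurd hne (toDigits_ne_nil _)
      · rw [hne] at h; simp at h
    · intro h; omega
  · rw [if_neg hneg]
    by_cases hbig : 10 ≤ k.toNat
    · rw [toDigits_step hbig]
      constructor
      · intro h
        rcases hne : Nat.toDigits 10 (k.toNat / 10) with _ | ⟨c, cs⟩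
        · exact absurd hne (toDigits_ne_nil _)
        · rw [hne] at h; simp at h
      · intro h; omega
    · rw [toDigits_small (by omega)]
      have hk : (k.toNat : Int) = k := Int.toNat_of_nonneg (by omega)
      constructor
      · intro h
        have := (digitChar_inj d hd k.toNat (by omega)).mp (by simpa using h)
        omega
      · intro h
        have hdk : d = k.toNat := by omega
        rw [hdk]

-- early-return for-loop over enumerate, as B performs it.
theorem enumerate_find (t : List Char) : ∀ (xs : List Char) (s : Int),
    (match (PySem.List.enumerate xs s).find? (fun p => [p.2] == t) with
      | some p => p.1 + 1
      | none => (-1 : Int)) =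
    (match xs.findIdx? (fun c => [c] == t) with
      | some j => s + j + 1
      | none => (-1 : Int)) := by
  intro xs
  induction xs with
  | nil => intro s; simp [PySem.List.enumerate]
  | cons x xs ih =>
    intro s
    rw [PySem.List.enumerate_cons]
    by_cases hx : [x] = t
    · simp [List.findIdx?_cons, hx]
    · have hbeq : ([x] == t) = false := by simp [hx]
      simp only [List.find?_cons, List.findIdx?_cons, hbeq, Bool.false_eq_true,
        if_false, ih (s + 1)]
      rcases xs.findIdx? (fun c => [c] == t) with _ | j
      · simp
      · simp only [Option.map_some]
        push_cast
        ring_nf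

-- findIdx? only looks at values of the predicate on members.
theorem findIdx?_congr {α : Type} (p q : α → Bool) :
    ∀ (l : List α), (∀ x ∈ l, p x = q x) → l.findIdx? p = l.findIdx? q := by
  intro l
  induction l with
  | nil => intro _; rfl
  | cons x xs ih =>
    intro h
    simp only [List.findIdx?_cons, h x (by simp)]
    rw [ih (fun y hy => h y (by simp [hy]))]

-- ===== VERDICT (by name: the statement is the Claim_ definition above) =====
theorem solution_spec : Claim_equal_solution := by
  intro num k hdom
  have hbound : num ≤ 2147483648 := by
    unfold Dom_solution pvDomInt at hdom
    simp only [Bool.and_eq_true, decide_eq_true_eq] at hdom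
    exact hdom.1.2
  unfold Spec_solution solution solution_alt
  by_cases hpos : num > 0
  · rw [if_neg (by omega)]
    lift num to Nat using (by omega : (0 : Int) ≤ num) with n
    have hnpos : 0 < n := by omega
    have hlen : (Nat.digits 10 n).length ≤ 10 := by
      rw [Nat.digits_length_le_iff (by norm_num) n]
      calc n ≤ 2147483648 := by omega
        _ < 10 ^ 10 := by norm_num
    -- A's side
    rw [solutionLoop_eq_scanDigits, scanDigits_spec]
    -- B's side
    have htc : PySem.Int.toChars (n : Int) = ((Nat.digits 10 n).reverse).map Nat.digitChar := by
      unfold PySem.Int.toChars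
      rw [if_neg (by omega)]
      simp only [Int.toNat_natCast]
      exact toDigits_eq_digits n hnpos
    rw [htc]
    rw [enumerate_find (PySem.Int.toChars k) ((Nat.digits 10 n).reverse.map Nat.digitChar) 0]
    have hmatch :
        (((Nat.digits 10 n).reverse.map Nat.digitChar).findIdx?
            (fun c => [c] == PySem.Int.toChars k))
          = (Nat.digits 10 n).reverse.findIdx? (fun d : Nat => decide ((d : Int) = k)) := by
      rw [List.findIdx?_map]
      apply findIdx?_congr
      intro d hd
      have hd10 : d < 10 := Nat.digits_lt_base (by norm_num) (List.mem_reverse.mp hd)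
      have hiff := singleton_eq_toChars_iff d hd10 k
      by_cases hP : [Nat.digitChar d] = PySem.Int.toChars k
      · simp [hP, hiff.mp hP]
      · simp [hP, show ¬((d : Int) = k) from fun h => hP (hiff.mpr h)]
    rw [hmatch]
    rcases hfi : (Nat.digits 10 n).reverse.findIdx? (fun d : Nat => decide ((d : Int) = k))
      with _ | j
    · simp
    · have hj : j < (Nat.digits 10 n).length := by
        have := List.findIdx?_eq_some_iff_findIdx_eq.mp hfi
        simpa using this.1
      simp only []
      rw [if_neg (pv_arith_ne10 (Nat.digits 10 n).length j hj hlen)]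
      exact pv_arith_final (Nat.digits 10 n).length j hj hlen
  · -- num ≤ 0: A's loop never runs, flag stays 10; B's guard fires.
    rw [solutionLoop, dif_neg hpos]
    simp [show num ≤ 0 by omega]
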